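-- pv_equiv track=rewrite | github.com/imfifc/myocr | ocr_structuring/core/utils/str_util.py | clean_eng_num_text_to_num
-- ===== SOURCE A (Python) =====
-- def clean_eng_num_text_to_num(text):
--     """
--     对医疗机构类型，有时候为纯数字，但是检测模型会检测出英文，则将英文替换为可能的数字
--     """
--     if not text:
--         return text
--     replace_map = {"B": 8, "O": "0", "o": "0", "K": "X", "I": '1', 'D': '0', 'G': '6', 'Y': 7, 'U': 0}
--
--     for need_replace in replace_map:
--         if need_replace in text:
--             text = text.replace(need_replace, str(replace_map[need_replace]))
--     return text
-- ===== SOURCE B (Python) =====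
-- def clean_eng_num_text_to_num(text):
--     """
--     对医疗机构类型，有时候为纯数字，但是检测模型会检测出英文，则将英文替换为可能的数字
--     """
--     if not text:
--         return text
--     mapping = {"B": "8", "O": "0", "o": "0", "K": "X", "I": "1", "D": "0", "G": "6", "Y": "7", "U": "0"}
--     return "".join(mapping.get(c, c) for c in text)
-- ===== Notes on version B (the rewrite author's own statement) =====
-- stated objective: simpler
-- what changed: A scans the whole string once per map key (up to 9 sequential 'in' tests and .replace passes, rebinding text each time); B walks the string's characters exactly once, looking each one up in a char-to-string dict and joining the results.
import Mathlib
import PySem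

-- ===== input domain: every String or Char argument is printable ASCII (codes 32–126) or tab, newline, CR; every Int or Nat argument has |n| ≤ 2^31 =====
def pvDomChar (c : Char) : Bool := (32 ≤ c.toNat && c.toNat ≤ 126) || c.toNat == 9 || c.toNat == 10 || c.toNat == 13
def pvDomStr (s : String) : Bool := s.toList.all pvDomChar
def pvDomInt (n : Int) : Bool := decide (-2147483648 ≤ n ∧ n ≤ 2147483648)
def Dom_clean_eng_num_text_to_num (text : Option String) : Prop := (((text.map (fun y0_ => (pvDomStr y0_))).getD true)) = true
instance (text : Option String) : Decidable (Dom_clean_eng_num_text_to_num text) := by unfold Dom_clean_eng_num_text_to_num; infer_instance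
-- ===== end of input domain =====

-- B replaces A's per-key full-string `.replace` passes by a single character-wise
-- traversal with a char→string lookup; equal on all inputs (objective: simpler).

-- ===== PORT A =====
-- replace_map, with str() applied to the int values at the point of use as in A
def pvReplaceMap : PySem.Dict String String :=
  PySem.Dict.ofList
    [("B", PySem.Int.toStr 8), ("O", "0"), ("o", "0"), ("K", "X"), ("I", "1"),
     ("D", "0"), ("G", "6"), ("Y", PySem.Int.toStr 7), ("U", PySem.Int.toStr 0)]

def clean_eng_num_text_to_num (text : Option String) : Option String :=
  match text with
  | none => none                                -- `if not text: return text` (None case)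
  | some t =>
    if PySem.Str.len t = 0 then some t          -- `if not text: return text` (empty-string case)
    else
      some ((PySem.Dict.keys pvReplaceMap).foldl
        (fun s k =>
          if PySem.Str.isIn k s then PySem.Str.replace s k (PySem.Dict.getD pvReplaceMap k "") else s)
        t)

-- ===== PORT B =====
def pvCharMap : PySem.Dict Char String :=
  PySem.Dict.ofList
    [('B', "8"), ('O', "0"), ('o', "0"), ('K', "X"), ('I', "1"),
     ('D', "0"), ('G', "6"), ('Y', "7"), ('U', "0")]

def clean_eng_num_text_to_num_alt (text : Option String) : Option String :=
  match text with
  | none => none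
  | some t =>
    if PySem.Str.len t = 0 then some t
    else
      some (PySem.Str.join ""
        (t.toList.map (fun c => PySem.Dict.getD pvCharMap c (String.ofList [c]))))

-- ===== PRECONDITION & SPEC =====
def Spec_clean_eng_num_text_to_num (text : Option String) (out : Option String) : Prop := out = clean_eng_num_text_to_num_alt text
instance (text : Option String) (out : Option String) : Decidable (Spec_clean_eng_num_text_to_num text out) := by unfold Spec_clean_eng_num_text_to_num; infer_instance

-- ===== CLAIM (what is proved, stated in full; the proofs are below) =====
def Claim_equal_clean_eng_num_text_to_num : Prop := ∀ (text : Option String), Dom_clean_eng_num_text_to_num text → Spec_clean_eng_num_text_to_num text (clean_eng_num_text_to_num text)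

-- ===== LEMMAS AND PROOFS =====

-- one single-character replacement acts character-wise
def pvStep (k v : Char) (c : Char) : Char := if c = k then v else c

lemma go_single (k v : Char) : ∀ (l acc : List Char),
    PySem.Chars.replace.go [k] [v] l.length l acc
      = acc.reverse ++ l.map (pvStep k v) := by
  intro l
  induction l with
  | nil => intro acc; simp [PySem.Chars.replace.go]
  | cons c t ih =>
    intro acc
    simp only [List.length_cons, PySem.Chars.replace.go]
    by_cases h : c = k
    · subst h; simp [List.isPrefixOf, ih, pvStep]
    · have hp : List.isPrefixOf [k] (c :: t) = false := by
        simp [List.isPrefixOf]; exact fun e => h e.symm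
      simp [hp, ih, pvStep, h]

lemma replace_single (k v : Char) (s : List Char) :
    PySem.Chars.replace s [k] [v] = s.map (pvStep k v) := by
  simp [PySem.Chars.replace, go_single]

-- one iteration of A's loop (the `in`-guard is redundant: an absent key replaces nothing)
lemma stepStr (k v : Char) (ks vs : String) (hk : ks.toList = [k]) (hv : vs.toList = [v]) (s : String) :
    (if PySem.Str.isIn ks s then PySem.Str.replace s ks vs else s).toList
      = s.toList.map (pvStep k v) := by
  by_cases h : PySem.Str.isIn ks s
  · rw [if_pos h, PySem.Str.toList_replace, hk, hv, replace_single]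
  · rw [if_neg h]
    have hnot : k ∉ s.toList := by
      intro hmem
      exact h (by rw [PySem.Str.isIn_iff_infix, hk]; exact (List.singleton_infix_iff k _).mpr hmem)
    symm
    rw [List.map_congr_left (g := id) fun c hc => ?_, List.map_id]
    have hne : c ≠ k := fun e => hnot (e ▸ hc)
    simp [pvStep, hne]

-- B's per-character lookup equals A's nine replacements applied in sequence
lemma charEq (c : Char) :
    (PySem.Dict.getD pvCharMap c (String.ofList [c])).toList = [pvStep 'U' '0' (pvStep 'Y' '7' (pvStep 'G' '6' (pvStep 'D' '0' (pvStep 'I' '1' (pvStep 'K' 'X' (pvStep 'o' '0' (pvStep 'O' '0' (pvStep 'B' '8' (c)))))))))] := by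
  by_cases h0 : c = 'B'
  · subst h0; decide
  by_cases h1 : c = 'O'
  · subst h1; decide
  by_cases h2 : c = 'o'
  · subst h2; decide
  by_cases h3 : c = 'K'
  · subst h3; decide
  by_cases h4 : c = 'I'
  · subst h4; decide
  by_cases h5 : c = 'D'
  · subst h5; decide
  by_cases h6 : c = 'G'
  · subst h6; decide
  by_cases h7 : c = 'Y'
  · subst h7; decide
  by_cases h8 : c = 'U'
  · subst h8; decide
  have h0' : ('B' == c) = false := beq_eq_false_iff_ne.mpr (fun e => h0 e.symm)
  have h1' : ('O' == c) = false := beq_eq_false_iff_ne.mpr (fun e => h1 e.symm)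
  have h2' : ('o' == c) = false := beq_eq_false_iff_ne.mpr (fun e => h2 e.symm)
  have h3' : ('K' == c) = false := beq_eq_false_iff_ne.mpr (fun e => h3 e.symm)
  have h4' : ('I' == c) = false := beq_eq_false_iff_ne.mpr (fun e => h4 e.symm)
  have h5' : ('D' == c) = false := beq_eq_false_iff_ne.mpr (fun e => h5 e.symm)
  have h6' : ('G' == c) = false := beq_eq_false_iff_ne.mpr (fun e => h6 e.symm)
  have h7' : ('Y' == c) = false := beq_eq_false_iff_ne.mpr (fun e => h7 e.symm)
  have h8' : ('U' == c) = false := beq_eq_false_iff_ne.mpr (fun e => h8 e.symm)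
  rw [show pvCharMap = PySem.Dict.mk [('B', "8"), ('O', "0"), ('o', "0"), ('K', "X"), ('I', "1"), ('D', "0"), ('G', "6"), ('Y', "7"), ('U', "0")] from by decide]
  simp [PySem.Dict.getD, PySem.Dict.get?, pvStep, h0, h1, h2, h3, h4, h5, h6, h7, h8, h0', h1', h2', h3', h4', h5', h6', h7', h8']

lemma listEq (t : String) :
    ((PySem.Dict.keys pvReplaceMap).foldl
        (fun s k =>
          if PySem.Str.isIn k s then PySem.Str.replace s k (PySem.Dict.getD pvReplaceMap k "") else s)
        t).toList
      = (PySem.Str.join ""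
          (t.toList.map (fun c => PySem.Dict.getD pvCharMap c (String.ofList [c])))).toList := by
  have hkeys : PySem.Dict.keys pvReplaceMap = ["B", "O", "o", "K", "I", "D", "G", "Y", "U"] := by decide
  rw [hkeys]
  simp only [List.foldl_cons, List.foldl_nil]
  rw [stepStr 'U' '0' "U" (PySem.Dict.getD pvReplaceMap "U" "") (by decide) (by decide)]
  rw [stepStr 'Y' '7' "Y" (PySem.Dict.getD pvReplaceMap "Y" "") (by decide) (by decide)]
  rw [stepStr 'G' '6' "G" (PySem.Dict.getD pvReplaceMap "G" "") (by decide) (by decide)]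
  rw [stepStr 'D' '0' "D" (PySem.Dict.getD pvReplaceMap "D" "") (by decide) (by decide)]
  rw [stepStr 'I' '1' "I" (PySem.Dict.getD pvReplaceMap "I" "") (by decide) (by decide)]
  rw [stepStr 'K' 'X' "K" (PySem.Dict.getD pvReplaceMap "K" "") (by decide) (by decide)]
  rw [stepStr 'o' '0' "o" (PySem.Dict.getD pvReplaceMap "o" "") (by decide) (by decide)]
  rw [stepStr 'O' '0' "O" (PySem.Dict.getD pvReplaceMap "O" "") (by decide) (by decide)]
  rw [stepStr 'B' '8' "B" (PySem.Dict.getD pvReplaceMap "B" "") (by decide) (by decide)]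
  rw [PySem.Str.join]
  simp only [String.toList_ofList, List.map_map, PySem.Chars.join]
  have h1 : (List.map (String.toList ∘ fun c => PySem.Dict.getD pvCharMap c (String.ofList [c])) t.toList)
      = (t.toList.map (fun c => pvStep 'U' '0' (pvStep 'Y' '7' (pvStep 'G' '6' (pvStep 'D' '0' (pvStep 'I' '1' (pvStep 'K' 'X' (pvStep 'o' '0' (pvStep 'O' '0' (pvStep 'B' '8' (c))))))))))).map (fun x => [x]) := by
    rw [List.map_map]
    exact List.map_congr_left (fun c _ => by simpa using charEq c)
  rw [h1, show ("" : String).toList = [] from rfl]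
  rw [show (([] : List Char).intercalate ((t.toList.map (fun c => pvStep 'U' '0' (pvStep 'Y' '7' (pvStep 'G' '6' (pvStep 'D' '0' (pvStep 'I' '1' (pvStep 'K' 'X' (pvStep 'o' '0' (pvStep 'O' '0' (pvStep 'B' '8' (c))))))))))).map (fun x => [x])))
        = PySem.Chars.join [] ((t.toList.map (fun c => pvStep 'U' '0' (pvStep 'Y' '7' (pvStep 'G' '6' (pvStep 'D' '0' (pvStep 'I' '1' (pvStep 'K' 'X' (pvStep 'o' '0' (pvStep 'O' '0' (pvStep 'B' '8' (c))))))))))).map (fun x => [x])) from rfl,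
      PySem.Chars.join_nil_singletons]
  simp [Function.comp]

-- ===== VERDICT (by name: the statement is the Claim_ definition above) =====
theorem clean_eng_num_text_to_num_spec : Claim_equal_clean_eng_num_text_to_num := by
  intro text _
  unfold Spec_clean_eng_num_text_to_num clean_eng_num_text_to_num clean_eng_num_text_to_num_alt
  match text with
  | none => rfl
  | some t =>
    show (if PySem.Str.len t = 0 then some t else _) = (if PySem.Str.len t = 0 then some t else _)
    by_cases hl : PySem.Str.len t = 0
    · rw [if_pos hl, if_pos hl]
    · rw [if_neg hl, if_neg hl]
      exact congrArg some (String.toList_inj.mp (listEq t))
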